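-- pv_equiv track=rewrite | github.com/flying-pisces/reddit-data-app | backend/intelligence/summarizer.py | _refine_summary
-- ===== SOURCE A (Python) =====
-- from typing import Dict, List, Optional, Tuple
--
-- def _refine_summary(sentence: str, post_data: Dict) -> str:
--     """Refine and optimize summary sentence for mobile consumption"""
--     if not sentence:
--         return f"Discussion in r/{post_data.get('subreddit', 'unknown')} about {post_data.get('title', 'market topics')}."
--
--     # Ensure sentence ends with punctuation
--     if not sentence.endswith(('.', '!', '?')):
--         sentence += '.'
--
--     # Limit length for mobile
--     if len(sentence) > 120:
--         words = sentence.split()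
--         while len(' '.join(words)) > 117 and len(words) > 5:
--             words.pop()
--         sentence = ' '.join(words) + '...'
--
--     return sentence
-- ===== SOURCE B (Python) =====
-- def _refine_summary(sentence: str, post_data) -> str:
--     """Refine and optimize summary sentence for mobile consumption.
--
--     Same result as the original, but the >120 truncation is a single
--     forward pass over cumulative word lengths that computes the cutoff
--     index directly, instead of a pop loop that re-joins every iteration.
--     """
--     if not sentence:
--         return f"Discussion in r/{post_data.get('subreddit', 'unknown')} about {post_data.get('title', 'market topics')}."
--
--     if not sentence.endswith(('.', '!', '?')):
--         sentence += '.'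
--
--     if len(sentence) > 120:
--         words = sentence.split()
--         n = len(words)
--         k = n
--         total = -1
--         for i, w in enumerate(words, 1):
--             total += len(w) + 1
--             if total > 117:
--                 k = min(n, max(5, i - 1))
--                 break
--         sentence = ' '.join(words[:k]) + '...'
--
--     return sentence
-- ===== Notes on version B (the rewrite author's own statement) =====
-- stated objective: alternative
-- what changed: The >120 truncation branch replaces the pop-from-the-end loop that re-joins the remaining words on every iteration with a single forward pass over cumulative word lengths that computes the cutoff index directly and joins once.
import Mathlib
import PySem

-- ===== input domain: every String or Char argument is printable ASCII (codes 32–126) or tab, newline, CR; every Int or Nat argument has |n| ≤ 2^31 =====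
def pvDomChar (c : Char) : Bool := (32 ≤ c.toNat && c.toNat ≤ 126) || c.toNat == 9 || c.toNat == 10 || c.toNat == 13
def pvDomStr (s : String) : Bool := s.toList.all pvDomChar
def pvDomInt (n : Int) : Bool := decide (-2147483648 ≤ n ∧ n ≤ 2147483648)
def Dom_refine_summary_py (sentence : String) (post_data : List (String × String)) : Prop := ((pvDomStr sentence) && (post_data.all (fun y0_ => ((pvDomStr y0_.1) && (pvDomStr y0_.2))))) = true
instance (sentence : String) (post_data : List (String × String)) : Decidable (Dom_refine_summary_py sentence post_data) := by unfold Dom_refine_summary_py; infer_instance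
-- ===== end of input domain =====

-- B replaces A's repeated-join pop loop in the >120 branch by a single forward
-- pass over cumulative word lengths that computes the cutoff index directly.

-- ===== PORT A =====

-- post_data.get(key, default): first-match association-list lookup (the task's dict convention)
def pvGetD (d : List (String × String)) (k dflt : String) : String :=
  ((d.find? (fun p => p.1 == k)).map Prod.snd).getD dflt

-- the f-string of the empty-sentence branch (identical in both Pythons), built on char lists
def pvFallback (post_data : List (String × String)) : String :=
  String.mk ("Discussion in r/".toList
    ++ (pvGetD post_data "subreddit" "unknown").toList
    ++ " about ".toList
    ++ (pvGetD post_data "title" "market topics").toList ++ ['.'])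

-- `while len(' '.join(words)) > 117 and len(words) > 5: words.pop()`
def pvPopLoop (words : List (List Char)) : List (List Char) :=
  if (PySem.Chars.join [' '] words).length > 117 ∧ words.length > 5 then
    pvPopLoop words.dropLast
  else words
termination_by words.length
decreasing_by
  rename_i h
  have : words ≠ [] := by intro hn; simp [hn] at h
  simp [List.length_dropLast]; omega

def refine_summary_py (sentence : String) (post_data : List (String × String)) : String :=
  let cs := sentence.toList
  if cs = [] then pvFallback post_data
  else
    let cs := if PySem.Chars.endswith cs ['.'] || PySem.Chars.endswith cs ['!'] ||
                 PySem.Chars.endswith cs ['?'] then cs else cs ++ ['.']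
    if cs.length > 120 then
      let words := PySem.Chars.split₀ cs
      let words := pvPopLoop words
      String.mk (PySem.Chars.join [' '] words ++ ['.', '.', '.'])
    else String.mk cs

-- ===== PORT B =====

-- `for i, w in enumerate(words, 1): total += len(w)+1; if total > 117: k = min(n, max(5, i-1)); break`
def pvScanK (ws : List (List Char)) (i : Nat) (total : Int) (n : Nat) : Nat :=
  match ws with
  | [] => n
  | w :: rest =>
      let total := total + w.length + 1
      let i := i + 1
      if total > 117 then min n (max 5 (i - 1)) else pvScanK rest i total n

def refine_summary_py_alt (sentence : String) (post_data : List (String × String)) : String :=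
  let cs := sentence.toList
  if cs = [] then pvFallback post_data
  else
    let cs := if PySem.Chars.endswith cs ['.'] || PySem.Chars.endswith cs ['!'] ||
                 PySem.Chars.endswith cs ['?'] then cs else cs ++ ['.']
    if cs.length > 120 then
      let words := PySem.Chars.split₀ cs
      let n := words.length
      let k := pvScanK words 0 (-1) n
      String.mk (PySem.Chars.join [' '] (words.take k) ++ ['.', '.', '.'])
    else String.mk cs

-- ===== PRECONDITION & SPEC =====
def Spec_refine_summary_py (sentence : String) (post_data : List (String × String)) (out : String) : Prop := out = refine_summary_py_alt sentence post_data
instance (sentence : String) (post_data : List (String × String)) (out : String) : Decidable (Spec_refine_summary_py sentence post_data out) := by unfold Spec_refine_summary_py; infer_instance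

-- ===== CLAIM (what is proved, stated in full; the proofs are below) =====
def Claim_equal_refine_summary_py : Prop := ∀ (sentence : String) (post_data : List (String × String)), Dom_refine_summary_py sentence post_data → Spec_refine_summary_py sentence post_data (refine_summary_py sentence post_data)

-- ===== LEMMAS AND PROOFS =====

-- length of the join of the first k words
def pvJl (ws : List (List Char)) (k : Nat) : Nat :=
  (PySem.Chars.join [' '] (ws.take k)).length

-- A's pop loop rephrased as a countdown on the prefix count
def pvDescK (ws : List (List Char)) : Nat → Nat
  | k => if pvJl ws k > 117 ∧ k > 5 then pvDescK ws (k - 1) else k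
termination_by k => k
decreasing_by rename_i h; omega

theorem pvJoin_append_singleton (l : List (List Char)) (w : List Char) :
    PySem.Chars.join [' '] (l ++ [w]) =
      if l = [] then w else PySem.Chars.join [' '] l ++ ' ' :: w := by
  induction l with
  | nil => simp [PySem.Chars.join_singleton]
  | cons a t ih =>
    cases t with
    | nil => simp [PySem.Chars.join_cons_cons, PySem.Chars.join_singleton]
    | cons b u =>
      simp only [List.cons_append, PySem.Chars.join_cons_cons] at *
      simp [ih]

theorem pvJl_mono_succ (ws : List (List Char)) (k : Nat) : pvJl ws k ≤ pvJl ws (k + 1) := by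
  by_cases h : ws.length ≤ k
  · simp [pvJl, List.take_of_length_le h, List.take_of_length_le (Nat.le_succ_of_le h)]
  · push_neg at h
    have ht : ws.take (k + 1) = ws.take k ++ [ws[k]] := by
      rw [List.take_add_one, List.getElem?_eq_getElem h]
      rfl
    rw [pvJl, pvJl, ht, pvJoin_append_singleton]
    split_ifs with he
    · simp [he]
    · simp

theorem pvJl_mono (ws : List (List Char)) {j k : Nat} (h : j ≤ k) : pvJl ws j ≤ pvJl ws k := by
  induction k with
  | zero => have : j = 0 := by omega
            subst this; exact le_rfl
  | succ m ih =>
    by_cases hj : j ≤ m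
    · exact le_trans (ih hj) (pvJl_mono_succ ws m)
    · have : j = m + 1 := by omega
      subst this; exact le_rfl

-- pvDescK when the stop condition is a threshold:  (jl j ≤ 117 ∨ j ≤ 5) ↔ j ≤ m
theorem pvDescK_threshold (ws : List (List Char)) (m : Nat)
    (hm : ∀ j, (pvJl ws j ≤ 117 ∨ j ≤ 5) ↔ j ≤ m) :
    ∀ n, pvDescK ws n = min n m := by
  intro n
  induction n with
  | zero =>
    rw [pvDescK]; simp
  | succ p ih =>
    rw [pvDescK]
    by_cases h : p + 1 ≤ m
    · have hg : pvJl ws (p + 1) ≤ 117 ∨ p + 1 ≤ 5 := (hm (p + 1)).2 h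
      split_ifs with hc
      · rcases hg with hg | hg <;> omega
      · omega
    · have hbad : ¬(pvJl ws (p + 1) ≤ 117 ∨ p + 1 ≤ 5) := fun hg => h ((hm (p + 1)).1 hg)
      push_neg at hbad
      have h5 : (5 : Nat) ≤ m := (hm 5).1 (Or.inr (by omega))
      have hc : pvJl ws (p + 1) > 117 ∧ p + 1 > 5 := by omega
      rw [if_pos hc]
      simp only [Nat.add_sub_cancel]
      rw [ih]
      omega

-- running total of the forward pass after consuming `pre`
def pvS (pre : List (List Char)) : Int :=
  (pre.map (fun w => (w.length : Int) + 1)).sum - 1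

theorem pvS_append (pre : List (List Char)) (w : List Char) :
    pvS (pre ++ [w]) = pvS pre + w.length + 1 := by
  simp [pvS]; ring

theorem pvS_eq_len (pre : List (List Char)) (h : pre ≠ []) :
    pvS pre = ((PySem.Chars.join [' '] pre).length : Int) := by
  induction pre with
  | nil => exact absurd rfl h
  | cons a t ih =>
    cases t with
    | nil => simp [pvS, PySem.Chars.join_singleton]
    | cons b u =>
      have ih' := ih (by simp)
      rw [PySem.Chars.join_cons_cons]
      simp only [pvS, List.map_cons, List.sum_cons, List.length_append, List.length_cons,
        List.length_nil] at ih' ⊢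
      push_cast at ih' ⊢
      omega

theorem pvS_eq_jl (ws pre rest : List (List Char)) (hsplit : ws = pre ++ rest)
    (hpos : pre ≠ []) : pvS pre = (pvJl ws pre.length : Int) := by
  have htake : ws.take pre.length = pre := by subst hsplit; simp
  rw [pvJl, htake]
  exact pvS_eq_len pre hpos

theorem pvScanK_eq_descK (ws : List (List Char)) :
    ∀ rest pre, ws = pre ++ rest →
      (∀ j, j ≤ pre.length → pvJl ws j ≤ 117) →
      pvScanK rest pre.length (pvS pre) ws.length = pvDescK ws ws.length := by
  intro rest
  induction rest with
  | nil =>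
    intro pre hsplit hinv
    have hn : pre.length = ws.length := by subst hsplit; simp
    have hgood : pvJl ws ws.length ≤ 117 := hn ▸ hinv pre.length le_rfl
    rw [pvScanK, pvDescK]
    rw [if_neg (by omega)]
  | cons w rest ih =>
    intro pre hsplit hinv
    rw [pvScanK]
    have hstep : pvS pre + ↑w.length + 1 = pvS (pre ++ [w]) := (pvS_append pre w).symm
    have hsplit' : ws = (pre ++ [w]) ++ rest := by simp [hsplit]
    have hjl1 : pvS (pre ++ [w]) = (pvJl ws (pre.length + 1) : Int) := by
      have := pvS_eq_jl ws (pre ++ [w]) rest hsplit' (by simp)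
      simpa using this
    by_cases hbr : pvS pre + ↑w.length + 1 > 117
    · rw [if_pos hbr]
      have hgt : (117 : Int) < (pvJl ws (pre.length + 1) : Int) := by
        rw [← hjl1, ← hstep]; exact hbr
      have hgtn : 117 < pvJl ws (pre.length + 1) := by exact_mod_cast hgt
      have hthr : ∀ j, (pvJl ws j ≤ 117 ∨ j ≤ 5) ↔ j ≤ max 5 pre.length := by
        intro j
        constructor
        · rintro (hj | hj)
          · by_contra hc
            push_neg at hc
            have hle : pre.length + 1 ≤ j := by omega
            have := pvJl_mono ws hle
            omega
          · omega
        · intro hj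
          by_cases hle : j ≤ pre.length
          · exact Or.inl (hinv j hle)
          · exact Or.inr (by omega)
      rw [pvDescK_threshold ws (max 5 pre.length) hthr ws.length]
      simp
    · rw [if_neg hbr]
      rw [hstep]
      have := ih (pre ++ [w]) hsplit' (by
        intro j hj
        by_cases hle : j ≤ pre.length
        · exact hinv j hle
        · have hje : j = pre.length + 1 := by simp at hj; omega
          have h1 : (pvJl ws (pre.length + 1) : Int) ≤ 117 := by
            rw [← hjl1, ← hstep]; omega
          have h2 : pvJl ws (pre.length + 1) ≤ 117 := by exact_mod_cast h1
          rw [hje]; exact h2)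
      simpa using this

theorem pvDescK_le (ws : List (List Char)) : ∀ n, pvDescK ws n ≤ n := by
  intro n
  induction n with
  | zero => rw [pvDescK]; simp
  | succ p ih =>
    rw [pvDescK]
    split_ifs with h
    · simp only [Nat.add_sub_cancel]
      omega
    · exact le_rfl

theorem pvDescK_congr (ws1 ws2 : List (List Char)) :
    ∀ n, (∀ k, k ≤ n → ws1.take k = ws2.take k) → pvDescK ws1 n = pvDescK ws2 n := by
  intro n
  induction n with
  | zero =>
    intro h
    conv_lhs => rw [pvDescK]
    conv_rhs => rw [pvDescK]
    simp
  | succ p ih =>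
    intro h
    have hjl : pvJl ws1 (p + 1) = pvJl ws2 (p + 1) := by
      unfold pvJl; rw [h (p + 1) le_rfl]
    conv_lhs => rw [pvDescK]
    conv_rhs => rw [pvDescK]
    rw [hjl]
    split_ifs with hc
    · simp only [Nat.add_sub_cancel]
      exact ih (fun k hk => h k (by omega))
    · rfl

theorem pvPopLoop_eq_take (ws : List (List Char)) :
    pvPopLoop ws = ws.take (pvDescK ws ws.length) := by
  induction hn : ws.length using Nat.strong_induction_on generalizing ws with
  | _ n ih =>
    subst hn
    rw [pvPopLoop]
    conv_rhs => rw [pvDescK]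
    have hfull : pvJl ws ws.length = (PySem.Chars.join [' '] ws).length := by
      simp [pvJl]
    rw [← hfull]
    split_ifs with h
    · have hne : ws ≠ [] := by
        intro hnil; rw [hnil] at h; simp at h
      have hdl : ws.dropLast.length = ws.length - 1 := by simp
      rw [ih (ws.length - 1) (by omega) ws.dropLast (by simp)]
      have hcong : pvDescK ws.dropLast (ws.length - 1) = pvDescK ws (ws.length - 1) := by
        apply pvDescK_congr
        intro k hk
        rw [List.dropLast_eq_take, List.take_take]
        congr 1; omega
      rw [hcong]
      have hle := pvDescK_le ws (ws.length - 1)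
      rw [List.dropLast_eq_take, List.take_take]
      congr 1
      omega
    · simp [List.take_of_length_le]

-- the two truncation computations agree
theorem pvTrunc_eq (ws : List (List Char)) :
    PySem.Chars.join [' '] (pvPopLoop ws) =
      PySem.Chars.join [' '] (ws.take (pvScanK ws 0 (-1) ws.length)) := by
  have hscan : pvScanK ws 0 (-1) ws.length = pvDescK ws ws.length := by
    have := pvScanK_eq_descK ws ws [] (by simp) (by
      intro j hj
      simp at hj
      subst hj
      simp [pvJl, PySem.Chars.join_nil])
    simpa [pvS] using this
  rw [hscan, pvPopLoop_eq_take]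

-- ===== VERDICT (by name: the statement is the Claim_ definition above) =====
theorem refine_summary_py_spec : Claim_equal_refine_summary_py := by
  intro sentence post_data _
  unfold Spec_refine_summary_py refine_summary_py refine_summary_py_alt
  simp only
  split_ifs
  all_goals first
    | rfl
    | rw [pvTrunc_eq]
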